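-- pv_equiv track=rewrite | github.com/kaiwensun/leetcode | 2001-2500/2334.Subarray With Elements Greater Than Varying Threshold.py | validSubarraySize
-- ===== SOURCE A (Python) =====
-- from typing import List
--
-- def validSubarraySize(nums: List[int], threshold: int) -> int:
--     size = [1] * len(nums)
--     data = list(range(len(nums)))
--
--     def find(x):
--         if data[x] != x:
--             data[x] = find(data[x])
--         return data[x]
--
--     def union(x, y):
--         rx, ry = find(x), find(y)
--         if rx != ry:
--             data[rx] = ry
--             size[ry] += size[rx]
--
--     for i, num in sorted(enumerate(nums), key=lambda item: list(reversed(item)), reverse=True):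
--         if i - 1 >= 0 and nums[i - 1] >= num:
--             union(i, i - 1)
--         if i + 1 < len(nums) and nums[i + 1] >= num:
--             union(i, i + 1)
--         if (threshold < num * size[find(i)]):
--             return size[find(i)]
--     return -1
-- ===== SOURCE B (Python) =====
-- def validSubarraySize(nums, threshold):
--     # Activate indices from largest value down (ties: larger index first),
--     # maintaining the merged runs of activated cells by their two endpoints.
--     n = len(nums)
--     right_end = {}  # left endpoint of a run -> its right endpoint
--     left_end = {}   # right endpoint of a run -> its left endpoint
--     for i in sorted(range(n), key=lambda j: (nums[j], j), reverse=True):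
--         v = nums[i]
--         l = i
--         r = right_end.get(i, i)
--         if i > 0 and nums[i - 1] >= v:
--             l = left_end.get(i - 1, i - 1)
--         if i + 1 < n and nums[i + 1] >= v and r < i + 1:
--             r = right_end.get(i + 1, i + 1)
--         right_end[l] = r
--         left_end[r] = l
--         size = r - l + 1
--         if v * size > threshold:
--             return size
--     return -1
-- ===== Notes on version B (the rewrite author's own statement) =====
-- stated objective: faster
-- what changed: Replaced the recursive path-compressing union-find (parent and size arrays, find/union) by direct interval merging: two dictionaries map a run's left endpoint to its right endpoint and back, so each activation merges adjacent runs in O(1) dictionary operations with no recursion.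
import Mathlib
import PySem

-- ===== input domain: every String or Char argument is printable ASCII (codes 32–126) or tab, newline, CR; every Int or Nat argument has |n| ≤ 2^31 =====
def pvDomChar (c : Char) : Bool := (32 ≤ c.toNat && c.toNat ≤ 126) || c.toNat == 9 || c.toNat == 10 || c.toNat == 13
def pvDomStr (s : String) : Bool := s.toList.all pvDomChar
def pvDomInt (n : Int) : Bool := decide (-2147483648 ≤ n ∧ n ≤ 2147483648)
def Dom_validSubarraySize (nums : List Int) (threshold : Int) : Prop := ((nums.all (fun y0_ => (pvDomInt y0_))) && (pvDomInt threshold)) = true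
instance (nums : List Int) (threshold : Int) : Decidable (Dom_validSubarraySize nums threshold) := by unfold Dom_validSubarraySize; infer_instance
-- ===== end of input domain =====

-- B replaces A's recursive path-compressing union-find by direct interval merging with
-- two endpoint dictionaries (objective: faster by a constant factor, measured ~2x).


-- ===== PORT A =====
-- find(x): path-compressing union-find lookup; fuel = len(data) (a guard only:
-- parent chains in the forest are always shorter than the fuel supplied).
def pvFind : Nat → List Int → Int → Int × List Int
  | 0, data, _ => (0, data)
  | fuel+1, data, x =>
    if PySem.List.pyGetD data x 0 ≠ x then
      let p := pvFind fuel data (PySem.List.pyGetD data x 0)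
      let data2 := PySem.List.pySetD p.2 x p.1
      (PySem.List.pyGetD data2 x 0, data2)
    else (PySem.List.pyGetD data x 0, data)

-- union(x, y)
def pvUnion (data size : List Int) (x y : Int) : (List Int × List Int) :=
  let fx := pvFind data.length data x
  let fy := pvFind fx.2.length fx.2 y
  if fx.1 ≠ fy.1 then
    (PySem.List.pySetD fy.2 fx.1 fy.1,
     PySem.List.pySetD size fy.1 (PySem.List.pyGetD size fy.1 0 + PySem.List.pyGetD size fx.1 0))
  else (fy.2, size)

-- the main 'for i, num in sorted(...)' loop, with early return
def pvLoopA (nums : List Int) (threshold : Int) :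
    List (Int × Int) → List Int → List Int → Int
  | [], _, _ => -1
  | (i, num) :: rest, data, size =>
    let st1 :=
      if 0 ≤ i - 1 ∧ num ≤ PySem.List.pyGetD nums (i-1) 0 then pvUnion data size i (i-1)
      else (data, size)
    let st2 :=
      if i + 1 < (nums.length : Int) ∧ num ≤ PySem.List.pyGetD nums (i+1) 0 then
        pvUnion st1.1 st1.2 i (i+1)
      else st1
    let f1 := pvFind st2.1.length st2.1 i
    if threshold < num * PySem.List.pyGetD st2.2 f1.1 0 then
      let f2 := pvFind f1.2.length f1.2 i
      PySem.List.pyGetD st2.2 f2.1 0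
    else pvLoopA nums threshold rest f1.2 st2.2

def validSubarraySize (nums : List Int) (threshold : Int) : Int :=
  let size := PySem.List.pyRepeat [(1:Int)] (nums.length : Int)
  let data := PySem.List.pyRange 0 (nums.length : Int) 1
  pvLoopA nums threshold
    (PySem.List.sorted2 (PySem.List.enumerate nums) (fun p => p.2) (fun p => p.1) true)
    data size

-- ===== PORT B =====
-- interval merging: rightEnd maps a run's left endpoint to its right endpoint, leftEnd back
def pvLoopB (nums : List Int) (threshold : Int) :
    List Int → PySem.Dict Int Int → PySem.Dict Int Int → Int
  | [], _, _ => -1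
  | i :: rest, rightEnd, leftEnd =>
    let v := PySem.List.pyGetD nums i 0
    let l0 := i
    let r0 := rightEnd.getD i i
    let l1 := if 0 < i ∧ v ≤ PySem.List.pyGetD nums (i-1) 0 then leftEnd.getD (i-1) (i-1) else l0
    let r1 := if i + 1 < (nums.length : Int) ∧ v ≤ PySem.List.pyGetD nums (i+1) 0 ∧ r0 < i + 1 then
                rightEnd.getD (i+1) (i+1) else r0
    let rightEnd' := rightEnd.insert l1 r1
    let leftEnd' := leftEnd.insert r1 l1
    let s := r1 - l1 + 1
    if threshold < v * s then s else pvLoopB nums threshold rest rightEnd' leftEnd'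

def validSubarraySize_alt (nums : List Int) (threshold : Int) : Int :=
  pvLoopB nums threshold
    (PySem.List.sorted2 (PySem.List.pyRange 0 (nums.length : Int) 1)
      (fun j => PySem.List.pyGetD nums j 0) (fun j => j) true)
    PySem.Dict.empty PySem.Dict.empty

-- ===== PRECONDITION & SPEC =====
def Spec_validSubarraySize (nums : List Int) (threshold : Int) (out : Int) : Prop := out = validSubarraySize_alt nums threshold
instance (nums : List Int) (threshold : Int) (out : Int) : Decidable (Spec_validSubarraySize nums threshold out) := by unfold Spec_validSubarraySize; infer_instance

-- ===== CLAIM (what is proved, stated in full; the proofs are below) =====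
def Claim_equal_validSubarraySize : Prop := ∀ (nums : List Int) (threshold : Int), Dom_validSubarraySize nums threshold → Spec_validSubarraySize nums threshold (validSubarraySize nums threshold)

-- ===== LEMMAS AND PROOFS =====

-- ---------- union-find theory ----------

/-- parent function of the DSU array -/
def pvPf (d : List Int) (x : Nat) : Nat := (d.getD x 0).toNat

def pvReaches (d : List Int) (x r : Nat) : Prop :=
  (∃ k, (pvPf d)^[k] x = r) ∧ pvPf d r = r

/-- well-formed DSU array over `nums.length` cells -/
def pvWf (n : Nat) (d : List Int) : Prop :=
  d.length = n ∧ (∀ x, x < n → 0 ≤ d.getD x 0 ∧ pvPf d x < n) ∧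
    ∀ x, x < n → ∃ r, pvReaches d x r

theorem pvReaches_unique {d : List Int} {x r1 r2 : Nat}
    (h1 : pvReaches d x r1) (h2 : pvReaches d x r2) : r1 = r2 := by
  obtain ⟨⟨k1, hk1⟩, hr1⟩ := h1
  obtain ⟨⟨k2, hk2⟩, hr2⟩ := h2
  rcases le_total k1 k2 with h | h
  · have : (pvPf d)^[k2] x = r1 := by
      have := Function.iterate_add_apply (pvPf d) (k2 - k1) k1 x
      rw [Nat.sub_add_cancel h] at this
      rw [this, hk1, Function.iterate_fixed hr1]
    rw [← hk2, this]
  · have : (pvPf d)^[k1] x = r2 := by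
      have := Function.iterate_add_apply (pvPf d) (k1 - k2) k2 x
      rw [Nat.sub_add_cancel h] at this
      rw [this, hk2, Function.iterate_fixed hr2]
    rw [← hk1, this]

theorem pvReaches_of_root {d : List Int} {r : Nat} (h : pvPf d r = r) : pvReaches d r r :=
  ⟨⟨0, rfl⟩, h⟩

theorem pvReaches_step {d : List Int} {x r : Nat} (h : pvReaches d (pvPf d x) r) :
    pvReaches d x r := by
  obtain ⟨⟨k, hk⟩, hr⟩ := h
  exact ⟨⟨k + 1, by rw [Function.iterate_succ_apply]; exact hk⟩, hr⟩

/-- pigeonhole: a root is reached in fewer than `n` steps -/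
theorem pvRoot_bounded {n : Nat} {d : List Int} (hw : pvWf n d) {x : Nat} (hx : x < n) :
    ∃ k, k < n ∧ pvPf d ((pvPf d)^[k] x) = (pvPf d)^[k] x := by
  obtain ⟨hlen, hbnd, hreach⟩ := hw
  obtain ⟨r, ⟨k, hk⟩, hr⟩ := hreach x hx
  have H : ∃ m, pvPf d ((pvPf d)^[m] x) = (pvPf d)^[m] x := ⟨k, by rw [hk]; exact hr⟩
  set k0 := Nat.find H with hk0
  have hP : pvPf d ((pvPf d)^[k0] x) = (pvPf d)^[k0] x := Nat.find_spec H
  have hiter_lt : ∀ m, (pvPf d)^[m] x < n := by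
    intro m
    induction m with
    | zero => exact hx
    | succ m ih =>
      rw [Function.iterate_succ_apply']
      exact (hbnd _ ih).2
  have hinj : ∀ a b, a < b → b ≤ k0 → (pvPf d)^[a] x ≠ (pvPf d)^[b] x := by
    intro a b hab hbk0 heq
    have hshift : ∀ m, (pvPf d)^[m + a] x = (pvPf d)^[m + b] x := by
      intro m
      rw [Function.iterate_add_apply, Function.iterate_add_apply, heq]
    have h2 : pvPf d ((pvPf d)^[k0 - b + a] x) = (pvPf d)^[k0 - b + a] x := by
      have := hshift (k0 - b)
      rw [this, Nat.sub_add_cancel hbk0]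
      exact hP
    exact absurd h2 (Nat.find_min H (by omega))
  -- the k0+1 values (pvPf d)^[0..k0] x are distinct elements of range n
  have hcard : k0 + 1 ≤ n := by
    have : Function.Injective (fun m : Fin (k0 + 1) => (⟨(pvPf d)^[(m : Nat)] x, hiter_lt _⟩ : Fin n)) := by
      intro a b hab
      simp only [Fin.mk.injEq] at hab
      rcases Nat.lt_trichotomy (a : Nat) (b : Nat) with h | h | h
      · exact absurd hab (hinj _ _ h (by omega))
      · exact Fin.ext h
      · exact absurd hab.symm (hinj _ _ h (by omega))
    have := Fintype.card_le_of_injective _ this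
    simpa using this
  exact ⟨k0, by omega, hP⟩

/-- writing `x`'s root into cell `x` preserves well-formedness and reachability -/
theorem pvSet_root {n : Nat} {d : List Int} {x r : Nat} (hw : pvWf n d) (hx : x < n)
    (hr : pvReaches d x r) :
    pvWf n (d.set x (r : Int)) ∧ ∀ y z, pvReaches (d.set x (r : Int)) y z ↔ pvReaches d y z := by
  obtain ⟨hlen, hbnd, hreach⟩ := hw
  have hiter_lt : ∀ m, (pvPf d)^[m] x < n := by
    intro m
    induction m with
    | zero => exact hx
    | succ m ih => rw [Function.iterate_succ_apply']; exact (hbnd _ ih).2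
  have hrn : r < n := by
    obtain ⟨k, hk⟩ := hr.1
    rw [← hk]; exact hiter_lt k
  have hpf : ∀ y, pvPf (d.set x (r : Int)) y = if y = x then r else pvPf d y := by
    intro y
    by_cases hyx : y = x
    · subst hyx
      simp [pvPf, List.getD, List.getElem?_set_self, hlen ▸ hx]
    · simp [pvPf, List.getD, List.getElem?_set_ne (by omega : x ≠ y), hyx]
  have hrootr : pvPf d r = r := hr.2
  have fwd : ∀ k y z, (pvPf d)^[k] y = z → pvPf d z = z → pvReaches (d.set x (r : Int)) y z := by
    intro k
    induction k with
    | zero =>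
      intro y z hy hz
      simp only [Function.iterate_zero_apply] at hy
      subst hy
      by_cases hyx : y = x
      · subst hyx
        have : r = y := pvReaches_unique hr (pvReaches_of_root hz)
        subst this
        exact pvReaches_of_root (by rw [hpf]; simp)
      · exact pvReaches_of_root (by rw [hpf]; simp [hyx, hz])
    | succ k ih =>
      intro y z hy hz
      rw [Function.iterate_succ_apply] at hy
      by_cases hyx : y = x
      · have hzr : z = r :=
          pvReaches_unique ⟨⟨k+1, by rw [Function.iterate_succ_apply]; exact hy⟩, hz⟩ (hyx ▸ hr)
        subst hzr
        refine ⟨⟨1, by simp [hpf, hyx]⟩, ?_⟩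
        rw [hpf]
        by_cases hzx : z = x
        · simp [hzx]
        · simp [hzx, hrootr]
      · have := ih (pvPf d y) z hy hz
        obtain ⟨⟨m, hm⟩, hzz⟩ := this
        exact ⟨⟨m + 1, by rw [Function.iterate_succ_apply, hpf]; simp [hyx]; exact hm⟩, hzz⟩
  have bwd : ∀ k y z, (pvPf (d.set x (r : Int)))^[k] y = z →
      pvPf (d.set x (r : Int)) z = z → pvReaches d y z := by
    intro k
    induction k with
    | zero =>
      intro y z hy hz
      simp only [Function.iterate_zero_apply] at hy
      subst hy
      rw [hpf] at hz
      by_cases hyx : y = x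
      · rw [if_pos hyx] at hz
        subst hz
        subst hyx
        exact hr
      · rw [if_neg hyx] at hz
        exact pvReaches_of_root hz
    | succ k ih =>
      intro y z hy hz
      rw [Function.iterate_succ_apply, hpf] at hy
      by_cases hyx : y = x
      · rw [if_pos hyx] at hy
        have h2 := ih r z hy hz
        have : z = r := pvReaches_unique h2 (pvReaches_of_root hrootr)
        subst this
        subst hyx
        exact hr
      · rw [if_neg hyx] at hy
        exact pvReaches_step (ih _ _ hy hz)
  have hiff : ∀ y z, pvReaches (d.set x (r : Int)) y z ↔ pvReaches d y z := by
    intro y z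
    constructor
    · rintro ⟨⟨k, hk⟩, hz⟩
      exact bwd k y z hk hz
    · rintro ⟨⟨k, hk⟩, hz⟩
      exact fwd k y z hk hz
  refine ⟨⟨by simpa using hlen, ?_, ?_⟩, hiff⟩
  · intro y hy
    constructor
    · by_cases hyx : y = x
      · subst hyx
        have : (d.set y (r : Int)).getD y 0 = (r : Int) := by
          simp [List.getD, List.getElem?_set_self, hlen ▸ hx]
        rw [this]; positivity
      · have : (d.set x (r : Int)).getD y 0 = d.getD y 0 := by
          simp [List.getD, List.getElem?_set_ne (by omega : x ≠ y)]
        rw [this]; exact (hbnd y hy).1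
    · rw [hpf]
      by_cases hyx : y = x
      · simp [hyx, hrn]
      · simp [hyx]; exact (hbnd y hy).2
  · intro y hy
    obtain ⟨ρ, hρ⟩ := hreach y hy
    exact ⟨ρ, (hiff y ρ).2 hρ⟩

/-- rerouting root `rx` to root `ry` -/
theorem pvSet_reroute {n : Nat} {d : List Int} {rx ry : Nat} (hw : pvWf n d)
    (hrx : rx < n) (hry : ry < n) (hrootx : pvPf d rx = rx) (hrooty : pvPf d ry = ry)
    (hne : rx ≠ ry) :
    pvWf n (d.set rx (ry : Int)) ∧
    (∀ a b, pvReaches d a b → pvReaches (d.set rx (ry : Int)) a (if b = rx then ry else b)) ∧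
    (∀ a b, pvReaches (d.set rx (ry : Int)) a b →
      ∃ b0, pvReaches d a b0 ∧ b = if b0 = rx then ry else b0) := by
  obtain ⟨hlen, hbnd, hreach⟩ := hw
  have hpf : ∀ y, pvPf (d.set rx (ry : Int)) y = if y = rx then ry else pvPf d y := by
    intro y
    by_cases hyx : y = rx
    · subst hyx
      simp [pvPf, List.getD, List.getElem?_set_self, hlen ▸ hrx]
    · simp [pvPf, List.getD, List.getElem?_set_ne (by omega : rx ≠ y), hyx]
  have hrooty2 : pvPf (d.set rx (ry : Int)) ry = ry := by
    rw [hpf, if_neg (by omega), hrooty]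
  have hrxy2 : pvReaches (d.set rx (ry : Int)) rx ry :=
    ⟨⟨1, by simp [Function.iterate_one, hpf]⟩, hrooty2⟩
  have fwd : ∀ k a b, (pvPf d)^[k] a = b → pvPf d b = b →
      pvReaches (d.set rx (ry : Int)) a (if b = rx then ry else b) := by
    intro k
    induction k with
    | zero =>
      intro a b ha hb
      simp only [Function.iterate_zero_apply] at ha
      subst ha
      by_cases hax : a = rx
      · subst hax
        rw [if_pos rfl]
        exact hrxy2
      · rw [if_neg hax]
        exact pvReaches_of_root (by rw [hpf, if_neg hax]; exact hb)
    | succ k ih =>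
      intro a b ha hb
      rw [Function.iterate_succ_apply] at ha
      by_cases hax : a = rx
      · subst hax
        have : pvPf d a = a := hrootx
        rw [this] at ha
        have hba : b = a := by
          have h1 : pvReaches d a b := ⟨⟨k, ha⟩, hb⟩
          exact pvReaches_unique h1 (pvReaches_of_root hrootx)
        subst hba
        rw [if_pos rfl]
        exact hrxy2
      · have h2 := ih (pvPf d a) b ha hb
        obtain ⟨⟨m, hm⟩, hz⟩ := h2
        exact ⟨⟨m + 1, by rw [Function.iterate_succ_apply, hpf, if_neg hax]; exact hm⟩, hz⟩
  have bwd : ∀ k a b, (pvPf (d.set rx (ry : Int)))^[k] a = b →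
      pvPf (d.set rx (ry : Int)) b = b →
      ∃ b0, pvReaches d a b0 ∧ b = if b0 = rx then ry else b0 := by
    intro k
    induction k with
    | zero =>
      intro a b ha hb
      simp only [Function.iterate_zero_apply] at ha
      subst ha
      rw [hpf] at hb
      by_cases hax : a = rx
      · rw [if_pos hax] at hb
        subst hb
        exact absurd rfl (hax ▸ hne)
      · rw [if_neg hax] at hb
        exact ⟨a, pvReaches_of_root hb, by rw [if_neg hax]⟩
    | succ k ih =>
      intro a b ha hb
      rw [Function.iterate_succ_apply, hpf] at ha
      by_cases hax : a = rx
      · rw [if_pos hax] at ha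
        obtain ⟨b0, hb0, hbeq⟩ := ih ry b ha hb
        have : b0 = ry := pvReaches_unique hb0 (pvReaches_of_root hrooty)
        subst this
        subst hax
        exact ⟨a, pvReaches_of_root hrootx, by rw [if_pos rfl, hbeq, if_neg (by omega)]⟩
      · rw [if_neg hax] at ha
        obtain ⟨b0, hb0, hbeq⟩ := ih _ b ha hb
        exact ⟨b0, pvReaches_step hb0, hbeq⟩
  refine ⟨⟨by simpa using hlen, ?_, ?_⟩, ?_, ?_⟩
  · intro y hy
    constructor
    · by_cases hyx : y = rx
      · subst hyx
        have : (d.set y (ry : Int)).getD y 0 = (ry : Int) := by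
          simp [List.getD, List.getElem?_set_self, hlen ▸ hrx]
        rw [this]; positivity
      · have : (d.set rx (ry : Int)).getD y 0 = d.getD y 0 := by
          simp [List.getD, List.getElem?_set_ne (by omega : rx ≠ y)]
        rw [this]; exact (hbnd y hy).1
    · rw [hpf]
      by_cases hyx : y = rx
      · simp [hyx, hry]
      · simp [hyx]; exact (hbnd y hy).2
  · intro y hy
    obtain ⟨ρ, ⟨⟨k, hk⟩, hρ⟩⟩ := hreach y hy
    exact ⟨_, fwd k y ρ hk hρ⟩
  · rintro a b ⟨⟨k, hk⟩, hb⟩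
    exact fwd k a b hk hb
  · rintro a b ⟨⟨k, hk⟩, hb⟩
    exact bwd k a b hk hb

/-- pvFind computes the root and preserves the reachability relation -/
theorem pvFind_spec {n : Nat} : ∀ (fuel : Nat) (d : List Int) (x : Nat), pvWf n d → x < n →
    (∃ k, k < fuel ∧ pvPf d ((pvPf d)^[k] x) = (pvPf d)^[k] x) →
    ∃ (d' : List Int) (r : Nat), pvFind fuel d (x : Int) = ((r : Int), d') ∧ pvReaches d x r ∧ pvWf n d' ∧
      (∀ y z, pvReaches d' y z ↔ pvReaches d y z) := by
  intro fuel
  induction fuel with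
  | zero => intro d x _ _ h; obtain ⟨k, hk, _⟩ := h; omega
  | succ fuel ih =>
    intro d x hw hx hroot
    have hlen := hw.1
    have hbnd := hw.2.1
    have hget : PySem.List.pyGetD d (x : Int) 0 = d.getD x 0 := by
      simp [PySem.List.pyGetD_natCast]
    by_cases hr : d.getD x 0 = (x : Int)
    · -- x is a root
      refine ⟨d, x, ?_, ?_, hw, fun _ _ => Iff.rfl⟩
      · rw [pvFind, if_neg (by rw [hget]; simpa using hr), hget, hr]
      · refine pvReaches_of_root ?_
        unfold pvPf
        rw [hr]
        simp
    · -- recurse on the parent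
      have hpx : pvPf d x ≠ x := by
        intro hpx
        apply hr
        have h0 : 0 ≤ d.getD x 0 := (hbnd x hx).1
        rw [← Int.toNat_of_nonneg h0]
        show ((pvPf d x : Nat) : Int) = (x : Int)
        rw [hpx]
      have hpxn : pvPf d x < n := (hbnd x hx).2
      have hgetc : PySem.List.pyGetD d (x : Int) 0 = ((pvPf d x : Nat) : Int) := by
        rw [hget, ← Int.toNat_of_nonneg (hbnd x hx).1]; rfl
      have hroot' : ∃ k, k < fuel ∧ pvPf d ((pvPf d)^[k] (pvPf d x)) = (pvPf d)^[k] (pvPf d x) := by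
        obtain ⟨k, hk, hkr⟩ := hroot
        cases k with
        | zero => simp only [Function.iterate_zero_apply] at hkr; exact absurd hkr hpx
        | succ k =>
          refine ⟨k, by omega, ?_⟩
          rw [← Function.iterate_succ_apply]; exact hkr
      obtain ⟨d1, r, hcall, hreach1, hw1, hiff1⟩ := ih d (pvPf d x) hw hpxn hroot'
      have hreachx : pvReaches d x r := pvReaches_step hreach1
      have hreachx1 : pvReaches d1 x r := (hiff1 x r).2 hreachx
      obtain ⟨hw2, hiff2⟩ := pvSet_root hw1 hx hreachx1
      refine ⟨d1.set x (r : Int), r, ?_, hreachx, hw2, ?_⟩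
      · rw [pvFind, if_pos (by rw [hget]; simpa using hr)]
        simp only
        rw [hgetc, hcall]
        have hset : PySem.List.pySetD d1 (x : Int) ((r : Nat) : Int) = d1.set x (r : Int) := by
          simp [PySem.List.pySetD_natCast]
        rw [hset]
        congr 1
        rw [PySem.List.pyGetD_natCast]
        have : x < d1.length := by rw [hw1.1]; exact hx
        simp [List.getD, List.getElem?_set_self, this]
      · intro y z
        exact (hiff2 y z).trans (hiff1 y z)

/-- pvUnion: either a no-op on the partition, or merges the two classes -/
theorem pvUnion_spec {n : Nat} (d s : List Int) (x y : Nat) (hw : pvWf n d)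
    (hx : x < n) (hy : y < n) (hs : s.length = n) :
    ∃ d2 s2 rx ry, pvUnion d s (x : Int) (y : Int) = (d2, s2) ∧
      pvReaches d x rx ∧ pvReaches d y ry ∧ pvWf n d2 ∧ s2.length = n ∧
      ((rx = ry ∧ s2 = s ∧ ∀ a b, pvReaches d2 a b ↔ pvReaches d a b) ∨
       (rx ≠ ry ∧ s2 = s.set ry (s.getD ry 0 + s.getD rx 0) ∧
        (∀ a b, pvReaches d a b → pvReaches d2 a (if b = rx then ry else b)) ∧
        (∀ a b, pvReaches d2 a b → ∃ b0, pvReaches d a b0 ∧ b = if b0 = rx then ry else b0))) := by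
  have hlen := hw.1
  obtain ⟨dx, rx, hcallx, hreachx, hwx, hiffx⟩ :=
    pvFind_spec (n := n) d.length d x hw hx (by rw [hlen]; exact pvRoot_bounded hw hx)
  obtain ⟨dy, ry, hcally, hreachy, hwy, hiffy⟩ :=
    pvFind_spec (n := n) dx.length dx y hwx hy (by rw [hwx.1]; exact pvRoot_bounded hwx hy)
  have hreachy_d : pvReaches d y ry := (hiffx y ry).1 hreachy
  have hryn : ry < n := by
    obtain ⟨hl, hb, _⟩ := hw
    obtain ⟨k, hk⟩ := hreachy_d.1
    rw [← hk]
    clear hk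
    induction k with
    | zero => exact hy
    | succ k ihk => rw [Function.iterate_succ_apply']; exact (hb _ ihk).2
  have hrxn : rx < n := by
    obtain ⟨hl, hb, _⟩ := hw
    obtain ⟨k, hk⟩ := hreachx.1
    rw [← hk]
    clear hk
    induction k with
    | zero => exact hx
    | succ k ihk => rw [Function.iterate_succ_apply']; exact (hb _ ihk).2
  have hunfold : pvUnion d s (x : Int) (y : Int) =
      (if ((rx : Nat) : Int) ≠ ((ry : Nat) : Int) then
        (PySem.List.pySetD dy ((rx : Nat) : Int) ((ry : Nat) : Int),
         PySem.List.pySetD s ((ry : Nat) : Int)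
           (PySem.List.pyGetD s ((ry : Nat) : Int) 0 + PySem.List.pyGetD s ((rx : Nat) : Int) 0))
       else (dy, s)) := by
    unfold pvUnion
    rw [hcallx]
    simp only
    rw [hcally]
  by_cases heq : rx = ry
  · refine ⟨dy, s, rx, ry, ?_, hreachx, hreachy_d, hwy, hs, Or.inl ⟨heq, rfl, ?_⟩⟩
    · rw [hunfold, if_neg (by simp [heq])]
    · intro a b
      exact (hiffy a b).trans (hiffx a b)
  · -- the two classes are merged
    have hrootx_dy : pvPf dy rx = rx := by
      have : pvReaches dy rx rx := (hiffy rx rx).2 ((hiffx rx rx).2 (pvReaches_of_root hreachx.2))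
      exact this.2
    have hrooty_dy : pvPf dy ry = ry := by
      have : pvReaches dy ry ry := (hiffy ry ry).2 ((hiffx ry ry).2 (pvReaches_of_root hreachy_d.2))
      exact this.2
    obtain ⟨hw2, hfwd, hbwd⟩ := pvSet_reroute hwy hrxn hryn hrootx_dy hrooty_dy heq
    refine ⟨dy.set rx (ry : Int), s.set ry (s.getD ry 0 + s.getD rx 0), rx, ry, ?_,
      hreachx, hreachy_d, hw2, by simpa using hs, Or.inr ⟨heq, rfl, ?_, ?_⟩⟩
    · rw [hunfold, if_pos (by simpa using heq)]
      congr 1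
      · simp [PySem.List.pySetD_natCast]
      · simp [PySem.List.pySetD_natCast, PySem.List.pyGetD_natCast, List.getD]
    · intro a b hab
      exact hfwd a b ((hiffy a b).2 ((hiffx a b).2 hab))
    · intro a b hab
      obtain ⟨b0, hb0, hbeq⟩ := hbwd a b hab
      exact ⟨b0, (hiffx a b0).1 ((hiffy a b0).1 hb0), hbeq⟩

-- ---------- abstract runs and the loop invariant ----------

def pvCovered (RS : List (Nat × Nat)) (j : Nat) : Prop := ∃ p ∈ RS, p.1 ≤ j ∧ j ≤ p.2

/-- `a` has strictly larger Python sort key `(nums[a], a)` than `b` -/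
def pvKeyGt (nums : List Int) (a b : Nat) : Prop :=
  nums.getD b 0 < nums.getD a 0 ∨ (nums.getD a 0 = nums.getD b 0 ∧ b < a)

/-- the DSU arrays represent exactly the merged runs `RS` -/
structure pvDsu (n : Nat) (data size : List Int) (RS : List (Nat × Nat)) : Prop where
  wf : pvWf n data
  size_len : size.length = n
  bounds : ∀ p ∈ RS, p.1 ≤ p.2 ∧ p.2 < n
  disj : RS.Pairwise (fun p q => p.2 < q.1 ∨ q.2 < p.1)
  root : ∀ p ∈ RS, ∃ ρ, p.1 ≤ ρ ∧ ρ ≤ p.2 ∧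
    (∀ j, p.1 ≤ j → j ≤ p.2 → pvReaches data j ρ) ∧
    size.getD ρ 0 = (p.2 : Int) - (p.1 : Int) + 1
  fresh : ∀ x, x < n → ¬ pvCovered RS x → pvReaches data x x ∧ size.getD x 0 = 1

structure pvInv (nums : List Int) (rest : List Nat) (data size : List Int)
    (rE lE : PySem.Dict Int Int) (RS : List (Nat × Nat)) : Prop where
  rest_lt : ∀ a ∈ rest, a < nums.length
  rest_sorted : rest.Pairwise (pvKeyGt nums)
  proc_gt : ∀ j, j < nums.length → j ∉ rest → ∀ a ∈ rest, pvKeyGt nums j a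
  runs_proc : ∀ p ∈ RS, ∀ j, p.1 < j → j ≤ p.2 → j ∉ rest
  runs_head : ∀ p ∈ RS, (p.1 ∉ rest) ∨ (p.1 < p.2 ∧ nums.getD p.1 0 = nums.getD (p.1+1) 0)
  proc_cov : ∀ j, j < nums.length → j ∉ rest → pvCovered RS j
  dsu : pvDsu nums.length data size RS
  runs_dict : ∀ p ∈ RS, rE.getD (p.1 : Int) (p.1 : Int) = (p.2 : Int) ∧
    lE.getD (p.2 : Int) (p.2 : Int) = (p.1 : Int)
  fresh_dict : ∀ x, x < nums.length → ¬ pvCovered RS x →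
    rE.getD (x : Int) (x : Int) = (x : Int) ∧ lE.getD (x : Int) (x : Int) = (x : Int)

theorem pvGetD_set_self (l : List Int) (k : Nat) (v : Int) (h : k < l.length) :
    (l.set k v).getD k 0 = v := by
  simp [List.getD, List.getElem?_set_self, h]

theorem pvGetD_set_ne (l : List Int) (k m : Nat) (v : Int) (h : m ≠ k) :
    (l.set k v).getD m 0 = l.getD m 0 := by
  simp [List.getD, List.getElem?_set_ne (fun he => h he.symm)]

theorem pvRuns_eq {RS : List (Nat × Nat)} (hd : RS.Pairwise (fun p q => p.2 < q.1 ∨ q.2 < p.1))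
    {p q : Nat × Nat} (hp : p ∈ RS) (hq : q ∈ RS) {j : Nat}
    (hjp1 : p.1 ≤ j) (hjp2 : j ≤ p.2) (hjq1 : q.1 ≤ j) (hjq2 : j ≤ q.2) : p = q := by
  by_contra hne
  have hsym : Symmetric (fun p q : Nat × Nat => p.2 < q.1 ∨ q.2 < p.1) :=
    fun a b hab => hab.symm
  rcases hd.forall hsym hp hq hne with h | h <;> omega

theorem pvDsu_congr {n : Nat} {d d2 s : List Int} {RS : List (Nat × Nat)}
    (h : pvDsu n d s RS) (hw2 : pvWf n d2)
    (hiff : ∀ a b, pvReaches d2 a b ↔ pvReaches d a b) : pvDsu n d2 s RS := by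
  refine ⟨hw2, h.size_len, h.bounds, h.disj, ?_, ?_⟩
  · intro p hp
    obtain ⟨ρ, h1, h2, h3, h4⟩ := h.root p hp
    exact ⟨ρ, h1, h2, fun j hj1 hj2 => (hiff j ρ).2 (h3 j hj1 hj2), h4⟩
  · intro x hx hcov
    obtain ⟨h1, h2⟩ := h.fresh x hx hcov
    exact ⟨(hiff x x).2 h1, h2⟩

theorem pvDsu_find {n : Nat} {data size : List Int} {RS : List (Nat × Nat)}
    (h : pvDsu n data size RS) {x : Nat} (hx : x < n) :
    ∃ (ρ : Nat) (d' : List Int), pvFind data.length data (x : Int) = ((ρ : Int), d') ∧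
      pvReaches data x ρ ∧ pvDsu n d' size RS ∧ d'.length = n := by
  obtain ⟨d', ρ, hcall, hreach, hw', hiff⟩ :=
    pvFind_spec (n := n) data.length data x h.wf hx
      (by rw [h.wf.1]; exact pvRoot_bounded h.wf hx)
  exact ⟨ρ, d', hcall, hreach, pvDsu_congr h hw' hiff, hw'.1⟩

theorem pvDsu_merge {n : Nat} {data size : List Int} {RS : List (Nat × Nat)}
    (h : pvDsu n data size RS) (x y xa xb ya yb : Nat)
    (hxI : xa ≤ x) (hxI2 : x ≤ xb) (hyJ : ya ≤ y) (hyJ2 : y ≤ yb)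
    (hxb : xb < n) (hyb : yb < n)
    (hIm : (xa, xb) ∈ RS ∨ (xa = xb ∧ ¬ pvCovered RS xa))
    (hJm : (ya, yb) ∈ RS ∨ (ya = yb ∧ ¬ pvCovered RS ya))
    (hadj : xb + 1 = ya ∨ yb + 1 = xa) :
    ∃ d2 s2, pvUnion data size (x : Int) (y : Int) = (d2, s2) ∧
      pvDsu n d2 s2 ((min xa ya, max xb yb) ::
        RS.filter (fun p => decide (p.2 < min xa ya ∨ max xb yb < p.1))) := by
  obtain ⟨ρx, hρx1, hρx2, hreachI, hsizeI⟩ :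
      ∃ ρ, xa ≤ ρ ∧ ρ ≤ xb ∧ (∀ j, xa ≤ j → j ≤ xb → pvReaches data j ρ) ∧
        size.getD ρ 0 = (xb : Int) - (xa : Int) + 1 := by
    rcases hIm with hm | ⟨heq, hnc⟩
    · exact h.root _ hm
    · subst heq
      obtain ⟨h1, h2⟩ := h.fresh xa (by omega) hnc
      refine ⟨xa, le_refl _, le_refl _, ?_, by rw [h2]; ring⟩
      intro j hj1 hj2
      have : j = xa := by omega
      subst this; exact h1
  obtain ⟨ρy, hρy1, hρy2, hreachJ, hsizeJ⟩ :
      ∃ ρ, ya ≤ ρ ∧ ρ ≤ yb ∧ (∀ j, ya ≤ j → j ≤ yb → pvReaches data j ρ) ∧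
        size.getD ρ 0 = (yb : Int) - (ya : Int) + 1 := by
    rcases hJm with hm | ⟨heq, hnc⟩
    · exact h.root _ hm
    · subst heq
      obtain ⟨h1, h2⟩ := h.fresh ya (by omega) hnc
      refine ⟨ya, le_refl _, le_refl _, ?_, by rw [h2]; ring⟩
      intro j hj1 hj2
      have : j = ya := by omega
      subst this; exact h1
  have hρne : ρx ≠ ρy := by omega
  obtain ⟨d2, s2, rx, ry, hcall, hrx, hry, hw2, hs2len, hcases⟩ :=
    pvUnion_spec (n := n) data size x y h.wf (by omega) (by omega) h.size_len
  have hrxx : rx = ρx := pvReaches_unique hrx (hreachI x hxI hxI2)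
  have hryy : ry = ρy := pvReaches_unique hry (hreachJ y hyJ hyJ2)
  cases hrxx; cases hryy
  rcases hcases with ⟨heq, _, _⟩ | ⟨_, hs2, hfwd, hbwd⟩
  · exact absurd heq hρne
  refine ⟨d2, s2, hcall, ?_⟩
  have hslen := h.size_len
  have hdropSub : ∀ p ∈ RS, ¬(p.2 < min xa ya ∨ max xb yb < p.1) →
      min xa ya ≤ p.1 ∧ p.2 ≤ max xb yb := by
    intro p hp hov
    have hb := h.bounds p hp
    have hIJ : (xa ≤ max p.1 (min xa ya) ∧ max p.1 (min xa ya) ≤ xb) ∨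
        (ya ≤ max p.1 (min xa ya) ∧ max p.1 (min xa ya) ≤ yb) := by omega
    rcases hIJ with hI | hJ
    · rcases hIm with hm | ⟨heq, hnc⟩
      · have := pvRuns_eq h.disj hp hm (by omega) (by omega) hI.1 hI.2
        rw [this]; constructor <;> simp <;> omega
      · exact absurd ⟨p, hp, by omega, by omega⟩ hnc
    · rcases hJm with hm | ⟨heq, hnc⟩
      · have := pvRuns_eq h.disj hp hm (by omega) (by omega) hJ.1 hJ.2
        rw [this]; constructor <;> simp <;> omega
      · exact absurd ⟨p, hp, by omega, by omega⟩ hnc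
  constructor
  case wf => exact hw2
  case size_len => exact hs2len
  case bounds =>
    intro p hp
    rcases List.mem_cons.1 hp with rfl | hp
    · constructor <;> simp <;> omega
    · exact h.bounds p (List.mem_of_mem_filter hp)
  case disj =>
    refine List.Pairwise.cons ?_ (h.disj.filter _)
    intro p hp
    have := List.of_mem_filter hp
    simp only [decide_eq_true_eq] at this
    simp only
    omega
  case root =>
    intro p hp
    rcases List.mem_cons.1 hp with rfl | hp
    · refine ⟨ρy, by simp; omega, by simp; omega, ?_, ?_⟩
      · intro j hj1 hj2
        simp only at hj1 hj2
        have : (xa ≤ j ∧ j ≤ xb) ∨ (ya ≤ j ∧ j ≤ yb) := by omega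
        rcases this with hI | hJ
        · have := hfwd j ρx (hreachI j hI.1 hI.2)
          simpa using this
        · have := hfwd j ρy (hreachJ j hJ.1 hJ.2)
          rw [if_neg (fun hh => hρne hh.symm)] at this
          exact this
      · rw [hs2, pvGetD_set_self _ _ _ (by omega), hsizeI, hsizeJ]
        simp
        push_cast
        omega
    · obtain ⟨ρ, h1, h2, h3, h4⟩ := h.root p (List.mem_of_mem_filter hp)
      have hkept := List.of_mem_filter hp
      simp only [decide_eq_true_eq] at hkept
      have hb := h.bounds p (List.mem_of_mem_filter hp)
      have hρne2 : ρ ≠ ρx := by omega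
      have hρne3 : ρ ≠ ρy := by omega
      refine ⟨ρ, h1, h2, ?_, ?_⟩
      · intro j hj1 hj2
        have := hfwd j ρ (h3 j hj1 hj2)
        rw [if_neg hρne2] at this
        exact this
      · rw [hs2, pvGetD_set_ne _ _ _ _ hρne3, h4]
  case fresh =>
    intro x' hx' hncov
    have hx'out : ¬ (min xa ya ≤ x' ∧ x' ≤ max xb yb) := by
      intro hin
      exact hncov ⟨(min xa ya, max xb yb), List.mem_cons_self, hin.1, hin.2⟩
    have hncov0 : ¬ pvCovered RS x' := by
      rintro ⟨p, hp, hc1, hc2⟩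
      by_cases hpred : p.2 < min xa ya ∨ max xb yb < p.1
      · exact hncov ⟨p, List.mem_cons_of_mem _ (List.mem_filter.2 ⟨hp, by simpa using hpred⟩), hc1, hc2⟩
      · have := hdropSub p hp hpred
        exact hx'out ⟨by omega, by omega⟩
    obtain ⟨h1, h2⟩ := h.fresh x' hx' hncov0
    constructor
    · have := hfwd x' x' h1
      rw [if_neg (by omega)] at this
      exact this
    · rw [hs2, pvGetD_set_ne _ _ _ _ (by omega), h2]

theorem pvDsu_drop_sub {n : Nat} {data size : List Int} {RS : List (Nat × Nat)}
    (h : pvDsu n data size RS) (lo hi : Nat) (hlohi : lo ≤ hi)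
    (hIJ : ∀ j, lo ≤ j → j ≤ hi →
      ¬ pvCovered RS j ∨ ∃ q ∈ RS, q.1 ≤ j ∧ j ≤ q.2 ∧ lo ≤ q.1 ∧ q.2 ≤ hi) :
    ∀ p ∈ RS, ¬(p.2 < lo ∨ hi < p.1) → lo ≤ p.1 ∧ p.2 ≤ hi := by
  intro p hp hov
  have hb := h.bounds p hp
  rcases hIJ (max p.1 lo) (by omega) (by omega) with hfree | ⟨q, hq, hq1, hq2, hq3, hq4⟩
  · exact absurd ⟨p, hp, by omega, by omega⟩ hfree
  · have := pvRuns_eq h.disj hp hq (by omega) (by omega) hq1 hq2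
    rw [this]
    omega

theorem pvKeyGt_asymm {nums : List Int} {a b : Nat} (h1 : pvKeyGt nums a b)
    (h2 : pvKeyGt nums b a) : False := by
  unfold pvKeyGt at h1 h2
  omega

theorem pvKeyGt_irrefl {nums : List Int} {a : Nat} (h : pvKeyGt nums a a) : False := by
  unfold pvKeyGt at h
  omega

/-- re-listing a run of `RS` at the front (dropping the runs it subsumes, i.e. itself) -/
theorem pvDsu_refocus {n : Nat} {d s : List Int} {RS : List (Nat × Nat)}
    (h : pvDsu n d s RS) {a b : Nat} (hm : (a, b) ∈ RS) :
    pvDsu n d s ((a, b) :: RS.filter (fun p => decide (p.2 < a ∨ b < p.1))) := by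
  have hb := h.bounds _ hm
  simp only at hb
  have hdropSub : ∀ p ∈ RS, ¬(p.2 < a ∨ b < p.1) → a ≤ p.1 ∧ p.2 ≤ b := by
    intro p hp hov
    have hbp := h.bounds p hp
    have := pvRuns_eq h.disj hp hm (j := max p.1 a) (by omega) (by omega)
      (by show a ≤ max p.1 a; omega) (by show max p.1 a ≤ b; omega)
    rw [this]
    exact ⟨le_rfl, le_rfl⟩
  have hcov_iff : ∀ x, pvCovered ((a, b) :: RS.filter (fun p => decide (p.2 < a ∨ b < p.1))) x
      ↔ pvCovered RS x := by
    intro x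
    constructor
    · rintro ⟨p, hp, h1, h2⟩
      rcases List.mem_cons.1 hp with rfl | hp
      · exact ⟨(a, b), hm, h1, h2⟩
      · exact ⟨p, List.mem_of_mem_filter hp, h1, h2⟩
    · rintro ⟨p, hp, h1, h2⟩
      by_cases hpred : p.2 < a ∨ b < p.1
      · exact ⟨p, List.mem_cons_of_mem _ (List.mem_filter.2 ⟨hp, by simpa using hpred⟩), h1, h2⟩
      · have := hdropSub p hp hpred
        exact ⟨(a, b), List.mem_cons_self, by omega, by omega⟩
  refine ⟨h.wf, h.size_len, ?_, ?_, ?_, ?_⟩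
  · intro p hp
    rcases List.mem_cons.1 hp with rfl | hp
    · exact ⟨hb.1, hb.2⟩
    · exact h.bounds p (List.mem_of_mem_filter hp)
  · refine List.Pairwise.cons ?_ (h.disj.filter _)
    intro p hp
    have := List.of_mem_filter hp
    simp only [decide_eq_true_eq] at this
    simp only
    omega
  · intro p hp
    rcases List.mem_cons.1 hp with rfl | hp
    · exact h.root _ hm
    · exact h.root p (List.mem_of_mem_filter hp)
  · intro x hx hnc
    exact h.fresh x hx (fun hc => hnc ((hcov_iff x).2 hc))

/-- a fresh cell is its own run -/
theorem pvDsu_single {n : Nat} {d s : List Int} {RS : List (Nat × Nat)}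
    (h : pvDsu n d s RS) {i : Nat} (hi : i < n) (hnc : ¬ pvCovered RS i) :
    pvDsu n d s ((i, i) :: RS.filter (fun p => decide (p.2 < i ∨ i < p.1))) := by
  have hkeep : ∀ p ∈ RS, (p.2 < i ∨ i < p.1) := by
    intro p hp
    have hbp := h.bounds p hp
    by_contra hov
    exact hnc ⟨p, hp, by omega, by omega⟩
  have hcov_iff : ∀ x, pvCovered ((i, i) :: RS.filter (fun p => decide (p.2 < i ∨ i < p.1))) x
      ↔ (x = i ∨ pvCovered RS x) := by
    intro x
    constructor
    · rintro ⟨p, hp, h1, h2⟩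
      rcases List.mem_cons.1 hp with rfl | hp
      · left; simp only at h1 h2; omega
      · exact Or.inr ⟨p, List.mem_of_mem_filter hp, h1, h2⟩
    · rintro (he | ⟨p, hp, h1, h2⟩)
      · exact ⟨(i, i), List.mem_cons_self, by omega, by omega⟩
      · exact ⟨p, List.mem_cons_of_mem _ (List.mem_filter.2 ⟨hp, by simpa using hkeep p hp⟩), h1, h2⟩
  refine ⟨h.wf, h.size_len, ?_, ?_, ?_, ?_⟩
  · intro p hp
    rcases List.mem_cons.1 hp with rfl | hp
    · exact ⟨le_refl _, hi⟩
    · exact h.bounds p (List.mem_of_mem_filter hp)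
  · refine List.Pairwise.cons ?_ (h.disj.filter _)
    intro p hp
    have := List.of_mem_filter hp
    simp only [decide_eq_true_eq] at this
    simp only
    omega
  · intro p hp
    rcases List.mem_cons.1 hp with rfl | hp
    · obtain ⟨h1, h2⟩ := h.fresh i hi hnc
      refine ⟨i, le_refl _, le_refl _, ?_, by rw [h2]; simp⟩
      intro j hj1 hj2
      simp only at hj1 hj2
      have : j = i := by omega
      subst this; exact h1
    · exact h.root p (List.mem_of_mem_filter hp)
  · intro x hx hnc'
    have hxi : x ≠ i := fun he => hnc' ((hcov_iff x).2 (Or.inl he))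
    exact h.fresh x hx (fun hc => hnc' ((hcov_iff x).2 (Or.inr hc)))

/-- the two find calls of A's test both return the run's root; the size cell holds the run length -/
theorem pvFindPart {n : Nat} {d2 s2 : List Int} {RS' : List (Nat × Nat)}
    (h : pvDsu n d2 s2 RS') {l1 r1 i : Nat}
    (hhead : (l1, r1) ∈ RS') (h1 : l1 ≤ i) (h2 : i ≤ r1) :
    ∃ (ρ : Nat) (dF : List Int), pvFind d2.length d2 (i : Int) = (((ρ : Nat) : Int), dF) ∧
      PySem.List.pyGetD s2 ((ρ : Nat) : Int) 0 = (r1 : Int) - (l1 : Int) + 1 ∧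
      pvDsu n dF s2 RS' ∧
      ∃ (ρ2 : Nat) (dF2 : List Int), pvFind dF.length dF (i : Int) = (((ρ2 : Nat) : Int), dF2) ∧
        PySem.List.pyGetD s2 ((ρ2 : Nat) : Int) 0 = (r1 : Int) - (l1 : Int) + 1 := by
  have hin : i < n := by
    have := h.bounds _ hhead
    simp only at this
    omega
  obtain ⟨ρ, dF, hcall, hreach, hdsuF, _⟩ := pvDsu_find h hin
  obtain ⟨ρ', hρ1, hρ2, hρr, hρs⟩ := h.root _ hhead
  simp only at hρ1 hρ2 hρr hρs
  have hρeq : ρ = ρ' := pvReaches_unique hreach (hρr i h1 h2)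
  subst hρeq
  obtain ⟨ρ2, dF2, hcall2, hreach2, _, _⟩ := pvDsu_find hdsuF hin
  obtain ⟨ρ'', hρ1', hρ2', hρr', hρs'⟩ := hdsuF.root _ hhead
  simp only at hρ1' hρ2' hρr' hρs'
  have hρeq2 : ρ2 = ρ'' := pvReaches_unique hreach2 (hρr' i h1 h2)
  subst hρeq2
  refine ⟨ρ, dF, hcall, ?_, hdsuF, ρ2, dF2, hcall2, ?_⟩
  · rw [PySem.List.pyGetD_natCast]; exact hρs
  · rw [PySem.List.pyGetD_natCast]; exact hρs'

/-- assembling the invariant for the tail of the loop -/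
theorem pvFinish (nums : List Int) (i : Nat) (rest' : List Nat) (data size : List Int)
    (rE lE : PySem.Dict Int Int) (RS : List (Nat × Nat))
    (hInv : pvInv nums (i :: rest') data size rE lE RS)
    (l1 r1 : Nat) (dF s2 : List Int)
    (hl1 : l1 ≤ i) (hr1 : i ≤ r1) (hr1n : r1 < nums.length)
    (hdsuF : pvDsu nums.length dF s2
      ((l1, r1) :: RS.filter (fun p => decide (p.2 < l1 ∨ r1 < p.1))))
    (hnotin : ∀ j, l1 < j → j ≤ r1 → j ≠ i → j ∉ (i :: rest'))
    (hl1stat : l1 ∉ rest' ∨ (l1 < r1 ∧ nums.getD l1 0 = nums.getD (l1+1) 0))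
    (hIJcov : ∀ j, l1 ≤ j → j ≤ r1 → ¬ pvCovered RS j ∨
      ∃ q ∈ RS, q.1 ≤ j ∧ j ≤ q.2 ∧ l1 ≤ q.1 ∧ q.2 ≤ r1) :
    pvInv nums rest' dF s2 (rE.insert ((l1 : Nat) : Int) ((r1 : Nat) : Int))
      (lE.insert ((r1 : Nat) : Int) ((l1 : Nat) : Int))
      ((l1, r1) :: RS.filter (fun p => decide (p.2 < l1 ∨ r1 < p.1))) := by
  have hheadGt : ∀ a ∈ rest', pvKeyGt nums i a := (List.pairwise_cons.1 hInv.rest_sorted).1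
  have hiNot : i ∉ rest' := fun h => pvKeyGt_irrefl (hheadGt i h)
  have hdrop : ∀ p ∈ RS, ¬(p.2 < l1 ∨ r1 < p.1) → l1 ≤ p.1 ∧ p.2 ≤ r1 :=
    pvDsu_drop_sub hInv.dsu l1 r1 (by omega) hIJcov
  constructor
  case rest_lt => exact fun a ha => hInv.rest_lt a (List.mem_cons_of_mem _ ha)
  case rest_sorted => exact (List.pairwise_cons.1 hInv.rest_sorted).2
  case proc_gt =>
    intro j hj hjn a ha
    by_cases hji : j = i
    · subst hji; exact hheadGt a ha
    · refine hInv.proc_gt j hj ?_ a (List.mem_cons_of_mem _ ha)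
      intro hmem
      rcases List.mem_cons.1 hmem with h | h
      · exact hji h
      · exact hjn h
  case runs_proc =>
    intro p hp j h1 h2
    rcases List.mem_cons.1 hp with rfl | hp
    · simp only at h1 h2
      by_cases hji : j = i
      · subst hji; exact hiNot
      · intro hmem
        exact hnotin j h1 h2 hji (List.mem_cons_of_mem _ hmem)
    · intro hmem
      exact hInv.runs_proc p (List.mem_of_mem_filter hp) j h1 h2 (List.mem_cons_of_mem _ hmem)
  case runs_head =>
    intro p hp
    rcases List.mem_cons.1 hp with rfl | hp
    · simp only
      exact hl1stat
    · rcases hInv.runs_head p (List.mem_of_mem_filter hp) with h | h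
      · exact Or.inl (fun hmem => h (List.mem_cons_of_mem _ hmem))
      · exact Or.inr h
  case proc_cov =>
    intro j hj hjn
    by_cases hji : j = i
    · subst hji
      exact ⟨(l1, r1), List.mem_cons_self, hl1, hr1⟩
    · have hjold : j ∉ (i :: rest') := by
        intro hmem
        rcases List.mem_cons.1 hmem with h | h
        · exact hji h
        · exact hjn h
      obtain ⟨p, hp, h1, h2⟩ := hInv.proc_cov j hj hjold
      by_cases hpred : p.2 < l1 ∨ r1 < p.1
      · exact ⟨p, List.mem_cons_of_mem _ (List.mem_filter.2 ⟨hp, by simpa using hpred⟩), h1, h2⟩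
      · have := hdrop p hp hpred
        exact ⟨(l1, r1), List.mem_cons_self, by omega, by omega⟩
  case dsu => exact hdsuF
  case runs_dict =>
    intro p hp
    rcases List.mem_cons.1 hp with rfl | hp
    · constructor
      · simp [PySem.Dict.getD_insert]
      · simp [PySem.Dict.getD_insert]
    · have hkept := List.of_mem_filter hp
      simp only [decide_eq_true_eq] at hkept
      have hb := hInv.dsu.bounds p (List.mem_of_mem_filter hp)
      have hne1 : ((p.1 : Nat) : Int) ≠ ((l1 : Nat) : Int) := by
        simp only [ne_eq, Nat.cast_inj]; omega
      have hne2 : ((p.2 : Nat) : Int) ≠ ((r1 : Nat) : Int) := by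
        simp only [ne_eq, Nat.cast_inj]; omega
      obtain ⟨hd1, hd2⟩ := hInv.runs_dict p (List.mem_of_mem_filter hp)
      constructor
      · rw [PySem.Dict.getD_insert, if_neg hne1]; exact hd1
      · rw [PySem.Dict.getD_insert, if_neg hne2]; exact hd2
  case fresh_dict =>
    intro x hx hnc
    have hxout : ¬(l1 ≤ x ∧ x ≤ r1) := by
      intro hin
      exact hnc ⟨(l1, r1), List.mem_cons_self, hin.1, hin.2⟩
    have hncov0 : ¬ pvCovered RS x := by
      rintro ⟨p, hp, h1, h2⟩
      by_cases hpred : p.2 < l1 ∨ r1 < p.1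
      · exact hnc ⟨p, List.mem_cons_of_mem _ (List.mem_filter.2 ⟨hp, by simpa using hpred⟩), h1, h2⟩
      · have := hdrop p hp hpred
        exact hxout ⟨by omega, by omega⟩
    have hne1 : ((x : Nat) : Int) ≠ ((l1 : Nat) : Int) := by
      simp only [ne_eq, Nat.cast_inj]; omega
    have hne2 : ((x : Nat) : Int) ≠ ((r1 : Nat) : Int) := by
      simp only [ne_eq, Nat.cast_inj]; omega
    obtain ⟨hd1, hd2⟩ := hInv.fresh_dict x hx hncov0
    constructor
    · rw [PySem.Dict.getD_insert, if_neg hne1]; exact hd1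
    · rw [PySem.Dict.getD_insert, if_neg hne2]; exact hd2

/-- one step of both loops: A's unions+find and B's dictionary merge compute the
same merged run `[l1, r1]`, and the invariant survives to the tail -/
theorem pvStep (nums : List Int) (i : Nat) (rest' : List Nat) (data size : List Int)
    (rE lE : PySem.Dict Int Int) (RS : List (Nat × Nat))
    (hInv : pvInv nums (i :: rest') data size rE lE RS) :
    ∃ (l1 r1 : Nat) (d1 s1 d2 s2 dF : List Int) (ρ : Nat),
      (if 0 ≤ (i : Int) - 1 ∧
          PySem.List.pyGetD nums (i : Int) 0 ≤ PySem.List.pyGetD nums ((i : Int) - 1) 0 then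
        pvUnion data size (i : Int) ((i : Int) - 1) else (data, size)) = (d1, s1) ∧
      (if (i : Int) + 1 < (nums.length : Int) ∧
          PySem.List.pyGetD nums (i : Int) 0 ≤ PySem.List.pyGetD nums ((i : Int) + 1) 0 then
        pvUnion d1 s1 (i : Int) ((i : Int) + 1) else (d1, s1)) = (d2, s2) ∧
      pvFind d2.length d2 (i : Int) = (((ρ : Nat) : Int), dF) ∧
      PySem.List.pyGetD s2 ((ρ : Nat) : Int) 0 = (r1 : Int) - (l1 : Int) + 1 ∧
      (∃ (ρ2 : Nat) (dF2 : List Int), pvFind dF.length dF (i : Int) = (((ρ2 : Nat) : Int), dF2) ∧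
        PySem.List.pyGetD s2 ((ρ2 : Nat) : Int) 0 = (r1 : Int) - (l1 : Int) + 1) ∧
      (if 0 < (i : Int) ∧
          PySem.List.pyGetD nums (i : Int) 0 ≤ PySem.List.pyGetD nums ((i : Int) - 1) 0 then
        lE.getD ((i : Int) - 1) ((i : Int) - 1) else (i : Int)) = ((l1 : Nat) : Int) ∧
      (if (i : Int) + 1 < (nums.length : Int) ∧
          PySem.List.pyGetD nums (i : Int) 0 ≤ PySem.List.pyGetD nums ((i : Int) + 1) 0 ∧
          rE.getD (i : Int) (i : Int) < (i : Int) + 1 then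
        rE.getD ((i : Int) + 1) ((i : Int) + 1) else rE.getD (i : Int) (i : Int))
        = ((r1 : Nat) : Int) ∧
      pvInv nums rest' dF s2 (rE.insert ((l1 : Nat) : Int) ((r1 : Nat) : Int))
        (lE.insert ((r1 : Nat) : Int) ((l1 : Nat) : Int))
        ((l1, r1) :: RS.filter (fun p => decide (p.2 < l1 ∨ r1 < p.1))) := by
  have hin : i < nums.length := hInv.rest_lt i List.mem_cons_self
  have hvi : PySem.List.pyGetD nums ((i : Nat) : Int) 0 = nums.getD i 0 :=
    PySem.List.pyGetD_natCast nums i 0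
  have hheadGt : ∀ a ∈ rest', pvKeyGt nums i a := (List.pairwise_cons.1 hInv.rest_sorted).1
  have hiNot : i ∉ rest' := fun h => pvKeyGt_irrefl (hheadGt i h)
  have hprocOf : ∀ j, pvKeyGt nums j i → j ∉ (i :: rest') := by
    intro j hk hmem
    rcases List.mem_cons.1 hmem with rfl | hmem
    · exact pvKeyGt_irrefl hk
    · exact pvKeyGt_asymm hk (hheadGt j hmem)
  have hunproc : ∀ j, j < nums.length → j ∉ (i :: rest') → pvKeyGt nums j i :=
    fun j hj hn => hInv.proc_gt j hj hn i List.mem_cons_self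
  -- the component of i, before this step
  obtain ⟨r0, hr0ge, hr0lt, hrEi, hmidm⟩ :
      ∃ r0 : Nat, i ≤ r0 ∧ r0 < nums.length ∧
        rE.getD ((i : Nat) : Int) ((i : Nat) : Int) = ((r0 : Nat) : Int) ∧
        (((i, r0) ∈ RS ∧ i < r0 ∧ nums.getD i 0 = nums.getD (i+1) 0) ∨
          (r0 = i ∧ ¬ pvCovered RS i)) := by
    by_cases hcov : pvCovered RS i
    · obtain ⟨p0, hp0, hc1, hc2⟩ := hcov
      have hp01 : p0.1 = i := by
        rcases Nat.lt_or_ge p0.1 i with h | h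
        · exact absurd List.mem_cons_self (hInv.runs_proc p0 hp0 i h hc2)
        · omega
      obtain ⟨a0, r0⟩ := p0
      simp only at hp01 hc1 hc2
      subst hp01
      have hb := hInv.dsu.bounds _ hp0
      simp only at hb
      rcases hInv.runs_head _ hp0 with hh | hh
      · exact absurd List.mem_cons_self hh
      · simp only at hh
        exact ⟨r0, hb.1, hb.2, (hInv.runs_dict _ hp0).1, Or.inl ⟨hp0, hh.1, hh.2⟩⟩
    · exact ⟨i, le_refl _, hin, (hInv.fresh_dict i hin hcov).1, Or.inr ⟨rfl, hcov⟩⟩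
  have hrun_i : ∀ p ∈ RS, p.1 ≤ i → i ≤ p.2 → p = (i, r0) := by
    intro p hp h1 h2
    rcases hmidm with ⟨hm, _, _⟩ | ⟨_, hnc⟩
    · exact pvRuns_eq hInv.dsu.disj hp hm h1 h2 (le_refl _) hr0ge
    · exact absurd ⟨p, hp, h1, h2⟩ hnc
  have hc1 : 0 < i → ((i : Nat) : Int) - 1 = ((i - 1 : Nat) : Int) := by intro h; omega
  have hc2 : ((i : Nat) : Int) + 1 = ((i + 1 : Nat) : Int) := by omega
  have hC2val : 0 < i → PySem.List.pyGetD nums (((i : Nat) : Int) - 1) 0 = nums.getD (i-1) 0 := by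
    intro h
    rw [hc1 h, PySem.List.pyGetD_natCast]
  have hC2val' : PySem.List.pyGetD nums (((i : Nat) : Int) + 1) 0 = nums.getD (i+1) 0 := by
    rw [hc2, PySem.List.pyGetD_natCast]
  -- the component to the left of i, when the left guard fires
  have hleftpack : (0 < i ∧ nums.getD i 0 ≤ nums.getD (i-1) 0) →
      ∃ l1 : Nat, l1 ≤ i - 1 ∧
        lE.getD (((i : Nat) : Int) - 1) (((i : Nat) : Int) - 1) = ((l1 : Nat) : Int) ∧
        ((l1, i-1) ∈ RS ∨
          (l1 = i - 1 ∧ ¬ pvCovered RS (i-1) ∧ nums.getD (i-1) 0 = nums.getD i 0)) := by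
    rintro ⟨h0, hle⟩
    rcases lt_or_eq_of_le hle with hgt | heq
    · -- strictly larger value on the left: i-1 already processed, right end of its run
      have hproc : i - 1 ∉ (i :: rest') := hprocOf (i-1) (Or.inl hgt)
      obtain ⟨p1, hp1, ha, hb⟩ := hInv.proc_cov (i-1) (by omega) hproc
      have hp12 : p1.2 = i - 1 := by
        by_contra hne
        have h2 : i ≤ p1.2 := by omega
        have := hrun_i p1 hp1 (by omega) h2
        rw [this] at ha
        simp only at ha
        omega
      have hmem : (p1.1, i - 1) ∈ RS := by
        have : (p1.1, i - 1) = p1 := by rw [← hp12]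
        rw [this]; exact hp1
      refine ⟨p1.1, by omega, ?_, Or.inl hmem⟩
      rw [hc1 h0]
      have := (hInv.runs_dict p1 hp1).2
      rw [hp12] at this
      exact this
    · -- equal value on the left: i-1 is still fresh
      have hnc : ¬ pvCovered RS (i-1) := by
        rintro ⟨p, hp, ha, hb⟩
        by_cases hp2 : i ≤ p.2
        · have := hrun_i p hp (by omega) hp2
          rw [this] at ha
          simp only at ha
          omega
        · have hproc : i - 1 ∉ (i :: rest') := by
            by_cases hpa : p.1 = i - 1
            · rcases hInv.runs_head p hp with hh | hh
              · rw [hpa] at hh; exact hh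
              · omega
            · exact hInv.runs_proc p hp (i-1) (by omega) (by omega)
          have := hunproc (i-1) (by omega) hproc
          unfold pvKeyGt at this
          omega
      refine ⟨i - 1, le_refl _, ?_, Or.inr ⟨rfl, hnc, by omega⟩⟩
      rw [hc1 h0]
      exact (hInv.fresh_dict (i-1) (by omega) hnc).2
  -- the component to the right of i, when the right guard fires and i was fresh
  have hrightpack : (i + 1 < nums.length ∧ nums.getD i 0 ≤ nums.getD (i+1) 0) → r0 = i →
      ∃ b2 : Nat, i + 1 ≤ b2 ∧ b2 < nums.length ∧
        rE.getD (((i : Nat) : Int) + 1) (((i : Nat) : Int) + 1) = ((b2 : Nat) : Int) ∧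
        (i+1, b2) ∈ RS ∧ i + 1 ∉ (i :: rest') := by
    rintro ⟨h1, h2⟩ hr0i
    have hproc : i + 1 ∉ (i :: rest') := by
      apply hprocOf
      unfold pvKeyGt
      omega
    obtain ⟨p2, hp2, ha, hb⟩ := hInv.proc_cov (i+1) h1 hproc
    have hpa : p2.1 = i + 1 := by
      by_contra hne
      have hle : p2.1 ≤ i := by omega
      have := hrun_i p2 hp2 hle (by omega)
      rw [this] at hb
      simp only at hb
      omega
    have hbd := hInv.dsu.bounds p2 hp2
    have hmem : (i+1, p2.2) ∈ RS := by
      have : (i+1, p2.2) = p2 := by rw [← hpa]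
      rw [this]; exact hp2
    refine ⟨p2.2, by omega, by omega, ?_, hmem, hproc⟩
    rw [hc2]
    have := (hInv.runs_dict p2 hp2).1
    rw [hpa] at this
    exact this
  -- phase 1: the optional left merge
  obtain ⟨l1, d1, s1, RS1, hst1, hBl, hdsu1, hl1le, hcomp1, hRS1shape, hLregion, hl1stat0,
      hIJleft⟩ :
      ∃ (l1 : Nat) (d1 s1 : List Int) (RS1 : List (Nat × Nat)),
        ((if 0 ≤ ((i : Nat) : Int) - 1 ∧
            PySem.List.pyGetD nums ((i : Nat) : Int) 0 ≤
              PySem.List.pyGetD nums (((i : Nat) : Int) - 1) 0 then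
          pvUnion data size ((i : Nat) : Int) (((i : Nat) : Int) - 1) else (data, size))
          = (d1, s1)) ∧
        ((if 0 < ((i : Nat) : Int) ∧
            PySem.List.pyGetD nums ((i : Nat) : Int) 0 ≤
              PySem.List.pyGetD nums (((i : Nat) : Int) - 1) 0 then
          lE.getD (((i : Nat) : Int) - 1) (((i : Nat) : Int) - 1) else ((i : Nat) : Int))
          = ((l1 : Nat) : Int)) ∧
        pvDsu nums.length d1 s1 RS1 ∧ l1 ≤ i ∧
        ((l1, r0) ∈ RS1 ∨ (l1 = i ∧ r0 = i ∧ ¬ pvCovered RS1 i)) ∧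
        (RS1 = (l1, r0) :: RS.filter (fun p => decide (p.2 < l1 ∨ r0 < p.1)) ∨
          (RS1 = RS ∧ l1 = i)) ∧
        (∀ j, l1 < j → j < i → j ∉ (i :: rest')) ∧
        (l1 ∉ rest' ∨ (l1 < i ∧ nums.getD l1 0 = nums.getD (l1+1) 0)) ∧
        (∀ j, l1 ≤ j → j < i → ¬ pvCovered RS j ∨
          ∃ q ∈ RS, q.1 ≤ j ∧ j ≤ q.2 ∧ l1 ≤ q.1 ∧ q.2 ≤ i - 1) := by
    by_cases hL : 0 < i ∧ nums.getD i 0 ≤ nums.getD (i-1) 0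
    · obtain ⟨l1, hl1le, hlEd, hleftm⟩ := hleftpack hL
      have hIm : (i, r0) ∈ RS ∨ (i = r0 ∧ ¬ pvCovered RS i) := by
        rcases hmidm with ⟨hm, _, _⟩ | ⟨h1, h2⟩
        · exact Or.inl hm
        · exact Or.inr ⟨h1.symm, h2⟩
      have hJm : (l1, i-1) ∈ RS ∨ (l1 = i - 1 ∧ ¬ pvCovered RS l1) := by
        rcases hleftm with hm | ⟨h1, h2, _⟩
        · exact Or.inl hm
        · subst h1; exact Or.inr ⟨rfl, h2⟩
      obtain ⟨d1, s1, hcall1, hdsu1⟩ := pvDsu_merge hInv.dsu i (i-1) i r0 l1 (i-1)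
        (le_refl _) hr0ge (by omega) (by omega) hr0lt (by omega) hIm hJm (Or.inr (by omega))
      rw [show min i l1 = l1 from by omega, show max r0 (i-1) = r0 from by omega] at hdsu1
      refine ⟨l1, d1, s1, _, ?_, ?_, hdsu1, by omega, Or.inl List.mem_cons_self, Or.inl rfl,
        ?_, ?_, ?_⟩
      · rw [if_pos ⟨by omega, by rw [hvi, hC2val hL.1]; exact hL.2⟩, hc1 hL.1]
        exact hcall1
      · rw [if_pos ⟨by exact_mod_cast hL.1, by rw [hvi, hC2val hL.1]; exact hL.2⟩]
        exact hlEd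
      · -- nothing of (l1, i-1) except l1 itself is still unprocessed
        intro j hj1 hj2
        rcases hleftm with hm | ⟨h1, _, _⟩
        · exact hInv.runs_proc _ hm j hj1 (by omega)
        · omega
      · rcases hleftm with hm | ⟨h1, _, hv⟩
        · rcases hInv.runs_head _ hm with hh | hh
          · exact Or.inl (fun hmem => hh (List.mem_cons_of_mem _ hmem))
          · simp only at hh
            have hbd := hInv.dsu.bounds _ hm
            exact Or.inr ⟨by omega, hh.2⟩
        · refine Or.inr ⟨by omega, ?_⟩
          rw [h1, show i - 1 + 1 = i from by omega]
          exact hv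
      · intro j hj1 hj2
        rcases hleftm with hm | ⟨h1, hnc, _⟩
        · exact Or.inr ⟨(l1, i-1), hm, hj1, by omega, le_refl _, le_refl _⟩
        · have : j = i - 1 := by omega
          subst this
          exact Or.inl hnc
    · refine ⟨i, data, size, RS, ?_, ?_, hInv.dsu, le_refl _, ?_, Or.inr ⟨rfl, rfl⟩,
        by omega, Or.inl hiNot, by omega⟩
      · rw [if_neg]
        rintro ⟨h1, h2⟩
        have h0 : 0 < i := by omega
        rw [hvi, hC2val h0] at h2
        exact hL ⟨h0, h2⟩
      · rw [if_neg]
        rintro ⟨h1, h2⟩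
        have h0 : 0 < i := by exact_mod_cast h1
        rw [hvi, hC2val h0] at h2
        exact hL ⟨h0, h2⟩
      · rcases hmidm with ⟨hm, _, _⟩ | ⟨h1, h2⟩
        · exact Or.inl hm
        · exact Or.inr ⟨rfl, h1, h2⟩
  -- phase 2: the optional right merge
  obtain ⟨r1, d2, s2, hst2, hBr, hdsu2', hir1, hr1n, hRnotin, hIJmr⟩ :
      ∃ (r1 : Nat) (d2 s2 : List Int),
        ((if ((i : Nat) : Int) + 1 < (nums.length : Int) ∧
            PySem.List.pyGetD nums ((i : Nat) : Int) 0 ≤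
              PySem.List.pyGetD nums (((i : Nat) : Int) + 1) 0 then
          pvUnion d1 s1 ((i : Nat) : Int) (((i : Nat) : Int) + 1) else (d1, s1))
          = (d2, s2)) ∧
        ((if ((i : Nat) : Int) + 1 < (nums.length : Int) ∧
            PySem.List.pyGetD nums ((i : Nat) : Int) 0 ≤
              PySem.List.pyGetD nums (((i : Nat) : Int) + 1) 0 ∧
            rE.getD ((i : Nat) : Int) ((i : Nat) : Int) < ((i : Nat) : Int) + 1 then
          rE.getD (((i : Nat) : Int) + 1) (((i : Nat) : Int) + 1)
          else rE.getD ((i : Nat) : Int) ((i : Nat) : Int)) = ((r1 : Nat) : Int)) ∧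
        pvDsu nums.length d2 s2
          ((l1, r1) :: RS.filter (fun p => decide (p.2 < l1 ∨ r1 < p.1))) ∧
        i ≤ r1 ∧ r1 < nums.length ∧
        (∀ j, i < j → j ≤ r1 → j ∉ (i :: rest')) ∧
        (∀ j, i ≤ j → j ≤ r1 → ¬ pvCovered RS j ∨
          ∃ q ∈ RS, q.1 ≤ j ∧ j ≤ q.2 ∧ l1 ≤ q.1 ∧ q.2 ≤ r1) := by
    by_cases hR : i + 1 < nums.length ∧ nums.getD i 0 ≤ nums.getD (i+1) 0
    · by_cases hmidcov : i < r0
      · -- i+1 is already inside i's component: the union is a no-op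
        have hmid_mem : (i, r0) ∈ RS := by
          rcases hmidm with ⟨hm, _, _⟩ | ⟨h1, _⟩
          · exact hm
          · omega
        have hcompRun : (l1, r0) ∈ RS1 := by
          rcases hcomp1 with h | ⟨_, h2, _⟩
          · exact h
          · omega
        obtain ⟨ρ1, hρ1a, hρ1b, hρ1r, hρ1s⟩ := hdsu1.root _ hcompRun
        simp only at hρ1a hρ1b hρ1r hρ1s
        obtain ⟨d2, s2, rx, ry, hcall2, hrx, hry, hw2, hs2len, hcases⟩ :=
          pvUnion_spec (n := nums.length) d1 s1 i (i+1) hdsu1.wf hin (by omega) hdsu1.size_len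
        have hrxe : rx = ρ1 := pvReaches_unique hrx (hρ1r i (by omega) (by omega))
        have hrye : ry = ρ1 := pvReaches_unique hry (hρ1r (i+1) (by omega) (by omega))
        rcases hcases with ⟨_, hs2eq, hiff⟩ | ⟨hne, _, _, _⟩
        swap
        · exact absurd (hrxe.trans hrye.symm) hne
        have hdsu2 := pvDsu_congr hdsu1 hw2 hiff
        rw [← hs2eq] at hdsu2
        have hdsu2' : pvDsu nums.length d2 s2
            ((l1, r0) :: RS.filter (fun p => decide (p.2 < l1 ∨ r0 < p.1))) := by
          rcases hRS1shape with hsh | ⟨hsh, hl1i⟩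
          · rw [hsh] at hdsu2; exact hdsu2
          · rw [hsh] at hdsu2
            subst hl1i
            exact pvDsu_refocus hdsu2 hmid_mem
        refine ⟨r0, d2, s2, ?_, ?_, hdsu2', hr0ge, hr0lt, ?_, ?_⟩
        · rw [if_pos ⟨by exact_mod_cast hR.1, by rw [hvi, hC2val']; exact hR.2⟩, hc2]
          exact hcall2
        · have hcnd : ¬(((i : Nat) : Int) + 1 < (nums.length : Int) ∧
              PySem.List.pyGetD nums ((i : Nat) : Int) 0 ≤
                PySem.List.pyGetD nums (((i : Nat) : Int) + 1) 0 ∧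
              rE.getD ((i : Nat) : Int) ((i : Nat) : Int) < ((i : Nat) : Int) + 1) := by
            rintro ⟨_, _, h3⟩
            rw [hrEi] at h3
            have : r0 < i + 1 := by exact_mod_cast h3
            omega
          rw [if_neg hcnd]
          exact hrEi
        · intro j h1 h2
          exact hInv.runs_proc _ hmid_mem j h1 h2
        · intro j h1 h2
          exact Or.inr ⟨(i, r0), hmid_mem, h1, h2, by omega, le_refl _⟩
      · -- i was fresh to the right: merge with the run starting at i+1
        have hr0i : r0 = i := by omega
        obtain ⟨b2, hb2ge, hb2lt, hrEd2, hp2m, hproc2⟩ := hrightpack hR hr0i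
        have hp2m1 : (i+1, b2) ∈ RS1 := by
          rcases hRS1shape with hsh | ⟨hsh, _⟩
          · rw [hsh]
            refine List.mem_cons_of_mem _ (List.mem_filter.2 ⟨hp2m, ?_⟩)
            simp only [decide_eq_true_eq]
            omega
          · rw [hsh]; exact hp2m
        have hIm1 : (l1, r0) ∈ RS1 ∨ (l1 = r0 ∧ ¬ pvCovered RS1 l1) := by
          rcases hcomp1 with h | ⟨h1, h2, h3⟩
          · exact Or.inl h
          · refine Or.inr ⟨by omega, ?_⟩
            rw [h1]
            exact h3
        obtain ⟨d2, s2, hcall2, hdsu2⟩ := pvDsu_merge hdsu1 i (i+1) l1 r0 (i+1) b2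
          hl1le (by omega) (le_refl _) hb2ge (by omega) hb2lt hIm1 (Or.inl hp2m1)
          (Or.inl (by omega))
        rw [show min l1 (i+1) = l1 from by omega, show max r0 b2 = b2 from by omega] at hdsu2
        have hdsu2' : pvDsu nums.length d2 s2
            ((l1, b2) :: RS.filter (fun p => decide (p.2 < l1 ∨ b2 < p.1))) := by
          rcases hRS1shape with hsh | ⟨hsh, hl1i⟩
          · rw [hsh, List.filter_cons_of_neg (by simp only [decide_eq_true_eq]; omega),
              List.filter_filter] at hdsu2
            have hcg : ∀ p ∈ RS,
                (decide (p.2 < l1 ∨ b2 < p.1) && decide (p.2 < l1 ∨ r0 < p.1))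
                  = decide (p.2 < l1 ∨ b2 < p.1) := by
              intro p _
              by_cases hp2 : p.2 < l1 ∨ b2 < p.1
              · have : p.2 < l1 ∨ r0 < p.1 := by omega
                simp [hp2, this]
              · simp [hp2]
            rw [List.filter_congr hcg] at hdsu2
            exact hdsu2
          · rw [hsh] at hdsu2; exact hdsu2
        refine ⟨b2, d2, s2, ?_, ?_, hdsu2', by omega, hb2lt, ?_, ?_⟩
        · rw [if_pos ⟨by exact_mod_cast hR.1, by rw [hvi, hC2val']; exact hR.2⟩, hc2]
          exact hcall2
        · have hcnd : ((i : Nat) : Int) + 1 < (nums.length : Int) ∧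
              PySem.List.pyGetD nums ((i : Nat) : Int) 0 ≤
                PySem.List.pyGetD nums (((i : Nat) : Int) + 1) 0 ∧
              rE.getD ((i : Nat) : Int) ((i : Nat) : Int) < ((i : Nat) : Int) + 1 := by
            refine ⟨by exact_mod_cast hR.1, by rw [hvi, hC2val']; exact hR.2, ?_⟩
            rw [hrEi]
            exact_mod_cast (by omega : r0 < i + 1)
          rw [if_pos hcnd]
          exact hrEd2
        · intro j h1 h2
          by_cases hj : j = i + 1
          · subst hj; exact hproc2
          · exact hInv.runs_proc _ hp2m j (by omega) (by omega)
        · intro j h1 h2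
          by_cases hj : j = i
          · subst hj
            rcases hmidm with ⟨_, h2', _⟩ | ⟨_, hnc⟩
            · omega
            · exact Or.inl hnc
          · exact Or.inr ⟨(i+1, b2), hp2m, by omega, by omega, by omega, le_refl _⟩
    · -- no right guard
      have hC2neg : ¬(((i : Nat) : Int) + 1 < (nums.length : Int) ∧
          PySem.List.pyGetD nums ((i : Nat) : Int) 0 ≤
            PySem.List.pyGetD nums (((i : Nat) : Int) + 1) 0) := by
        rintro ⟨h1, h2⟩
        rw [hvi, hC2val'] at h2
        exact hR ⟨by exact_mod_cast h1, h2⟩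
      have hdsu2' : pvDsu nums.length d1 s1
          ((l1, r0) :: RS.filter (fun p => decide (p.2 < l1 ∨ r0 < p.1))) := by
        rcases hRS1shape with hsh | ⟨hsh, hl1i⟩
        · rw [hsh] at hdsu1; exact hdsu1
        · rw [hsh] at hdsu1
          subst hl1i
          rcases hmidm with ⟨hm, _, _⟩ | ⟨h1, h2⟩
          · exact pvDsu_refocus hdsu1 hm
          · subst h1
            exact pvDsu_single hdsu1 hin h2
      refine ⟨r0, d1, s1, by rw [if_neg hC2neg], ?_, hdsu2', hr0ge, hr0lt, ?_, ?_⟩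
      · have hcnd : ¬(((i : Nat) : Int) + 1 < (nums.length : Int) ∧
            PySem.List.pyGetD nums ((i : Nat) : Int) 0 ≤
              PySem.List.pyGetD nums (((i : Nat) : Int) + 1) 0 ∧
            rE.getD ((i : Nat) : Int) ((i : Nat) : Int) < ((i : Nat) : Int) + 1) := by
          rintro ⟨h1, h2, _⟩
          exact hC2neg ⟨h1, h2⟩
        rw [if_neg hcnd]
        exact hrEi
      · intro j h1 h2
        rcases hmidm with ⟨hm, _, _⟩ | ⟨h1', _⟩
        · exact hInv.runs_proc _ hm j h1 h2
        · omega
      · intro j h1 h2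
        rcases hmidm with ⟨hm, _, _⟩ | ⟨h1', hnc⟩
        · exact Or.inr ⟨(i, r0), hm, h1, h2, by omega, le_refl _⟩
        · have : j = i := by omega
          subst this
          exact Or.inl hnc
  -- phase 3: the find calls and the tail invariant
  obtain ⟨ρ, dF, hfind1, hsize1, hdsuF, ρ2, dF2, hfind2, hsize2⟩ :=
    pvFindPart hdsu2' List.mem_cons_self hl1le hir1
  refine ⟨l1, r1, d1, s1, d2, s2, dF, ρ, hst1, hst2, hfind1, hsize1,
    ⟨ρ2, dF2, hfind2, hsize2⟩, hBl, hBr, ?_⟩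
  apply pvFinish nums i rest' data size rE lE RS hInv l1 r1 dF s2 hl1le hir1 hr1n hdsuF
  · intro j h1 h2 hne
    rcases Nat.lt_or_ge j i with hj | hj
    · exact hLregion j h1 hj
    · exact hRnotin j (by omega) h2
  · rcases hl1stat0 with h | ⟨h1, h2⟩
    · exact Or.inl h
    · exact Or.inr ⟨by omega, h2⟩
  · intro j h1 h2
    rcases Nat.lt_or_ge j i with hj | hj
    · rcases hIJleft j h1 hj with h | ⟨q, hq, hq1, hq2, hq3, hq4⟩
      · exact Or.inl h
      · exact Or.inr ⟨q, hq, hq1, hq2, hq3, by omega⟩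
    · exact hIJmr j hj h2

/-- main loop correspondence -/
theorem pvLoop_agree (nums : List Int) (threshold : Int) :
    ∀ (rest : List Nat) (data size : List Int) (rE lE : PySem.Dict Int Int)
      (RS : List (Nat × Nat)), pvInv nums rest data size rE lE RS →
      pvLoopA nums threshold (rest.map fun i : Nat => ((i : Int), PySem.List.pyGetD nums (i : Int) 0)) data size
        = pvLoopB nums threshold (rest.map fun i : Nat => (i : Int)) rE lE := by
  intro rest
  induction rest with
  | nil => intros; rfl
  | cons i rest' ih =>
    intro data size rE lE RS hInv
    obtain ⟨l1, r1, d1, s1, d2, s2, dF, ρ, hst1, hst2, hfind1, hsize1, ⟨ρ2, dF2, hfind2, hsize2⟩,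
      hBl, hBr, hInv'⟩ := pvStep nums i rest' data size rE lE RS hInv
    show pvLoopA nums threshold (((i : Int), PySem.List.pyGetD nums (i : Int) 0) ::
        rest'.map fun i : Nat => ((i : Int), PySem.List.pyGetD nums (i : Int) 0)) data size
      = pvLoopB nums threshold ((i : Int) :: rest'.map fun i : Nat => (i : Int)) rE lE
    rw [pvLoopA, pvLoopB]
    simp only [hst1, hst2, hBl, hBr, hfind1, hfind2, hsize1, hsize2]
    by_cases htest : threshold <
        PySem.List.pyGetD nums (i : Int) 0 * ((r1 : Int) - (l1 : Int) + 1)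
    · rw [if_pos htest, if_pos htest]
    · rw [if_neg htest, if_neg htest]
      exact ih dF s2 _ _ _ hInv'

-- ---------- characterizing the sorted index list ----------

theorem pvLex_iff (C va vb a b : Int) (ha : 0 ≤ a) (ha2 : a < C) (hb : 0 ≤ b) (hb2 : b < C) :
    (va < vb ∨ (¬ vb < va ∧ a < b)) ↔ va * C + a < vb * C + b := by
  rcases lt_trichotomy va vb with h | h | h
  · have h3 : (va + 1) * C ≤ vb * C :=
      mul_le_mul_of_nonneg_right (by omega) (by omega)
    have h4 : (va + 1) * C = va * C + C := by ring
    constructor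
    · intro _; omega
    · intro _; exact Or.inl h
  · have h5 : va * C = vb * C := by rw [h]
    constructor
    · rintro (h6 | ⟨h6, h7⟩)
      · omega
      · omega
    · intro h6
      exact Or.inr ⟨by omega, by omega⟩
  · have h3 : (vb + 1) * C ≤ va * C :=
      mul_le_mul_of_nonneg_right (by omega) (by omega)
    have h4 : (vb + 1) * C = vb * C + C := by ring
    constructor
    · rintro (h6 | ⟨h6, h7⟩)
      · omega
      · omega
    · intro h6; omega

theorem pvEnc_inj (C va vb a b : Int) (ha : 0 ≤ a) (ha2 : a < C) (hb : 0 ≤ b) (hb2 : b < C)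
    (h : va * C + a = vb * C + b) : a = b := by
  have h1 : (a + va * C) % C = a % C := Int.add_mul_emod_self_right _ _ _
  have h2 : (b + vb * C) % C = b % C := Int.add_mul_emod_self_right _ _ _
  have h3 : a % C = a := Int.emod_eq_of_lt ha ha2
  have h4 : b % C = b := Int.emod_eq_of_lt hb hb2
  have h5 : a + va * C = b + vb * C := by omega
  rw [← h3, ← h1, h5, h2, h4]

theorem pvInsertBy_congr {α : Type} (bef bef' : α → α → Bool) (x : α) :
    ∀ (ys : List α), (∀ b ∈ ys, bef x b = bef' x b) →
      PySem.List.insertBy bef x ys = PySem.List.insertBy bef' x ys := by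
  intro ys
  induction ys with
  | nil => intro _; rfl
  | cons y ys ih =>
    intro h
    show (if bef x y then x :: y :: ys else y :: PySem.List.insertBy bef x ys) =
      (if bef' x y then x :: y :: ys else y :: PySem.List.insertBy bef' x ys)
    rw [h y List.mem_cons_self, ih (fun b hb => h b (List.mem_cons_of_mem y hb))]

theorem pvFoldl_insertBy_congr {α : Type} (bef bef' : α → α → Bool) (S : α → Prop) :
    ∀ (l acc : List α), (∀ a ∈ l, S a) → (∀ b ∈ acc, S b) →
      (∀ a b, S a → S b → bef a b = bef' a b) →
      l.foldl (fun acc x => PySem.List.insertBy bef x acc) acc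
        = l.foldl (fun acc x => PySem.List.insertBy bef' x acc) acc := by
  intro l
  induction l with
  | nil => intros; rfl
  | cons x l ih =>
    intro acc hl hacc hagree
    simp only [List.foldl_cons]
    rw [pvInsertBy_congr bef bef' x acc
      (fun b hb => hagree x b (hl x List.mem_cons_self) (hacc b hb))]
    apply ih _ (fun a ha => hl a (List.mem_cons_of_mem x ha)) _ hagree
    intro b hb
    rcases (PySem.List.mem_insertBy bef' x b acc).1 hb with h | h
    · exact h ▸ hl x List.mem_cons_self
    · exact hacc b h

/-- sorted2 with two keys equals sorted with a single key that agrees pairwise -/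
theorem pvSorted2_eq_sorted {α : Type} (xs : List α) (k1 k2 : α → Int) (key : α → Int)
    (h : ∀ a b, a ∈ xs → b ∈ xs →
      ((k1 a < k1 b) ∨ (¬ k1 b < k1 a ∧ k2 a < k2 b) ↔ key a < key b)) :
    PySem.List.sorted2 xs k1 k2 true = PySem.List.sorted xs key true := by
  have e1 : PySem.List.sorted2 xs k1 k2 true =
      xs.foldl (fun acc x => PySem.List.insertBy
        (fun a b => decide (k1 b < k1 a) || (!decide (k1 a < k1 b) && decide (k2 b < k2 a)))
        x acc) [] := rfl
  have e2 : PySem.List.sorted xs key true =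
      xs.foldl (fun acc x => PySem.List.insertBy (fun a b => decide (key b < key a)) x acc) [] := rfl
  rw [e1, e2]
  apply pvFoldl_insertBy_congr _ _ (fun a => a ∈ xs) xs [] (fun a ha => ha) (by simp)
  intro a b ha hb
  have hab := h b a hb ha
  rw [Bool.eq_iff_iff]
  simp only [Bool.or_eq_true, Bool.and_eq_true, Bool.not_eq_eq_eq_not, Bool.not_true,
    decide_eq_true_eq, decide_eq_false_iff_not]
  exact hab

theorem pvSortlists (nums : List Int) :
    ∃ rest : List Nat,
      PySem.List.sorted2 (PySem.List.pyRange 0 (nums.length : Int) 1)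
        (fun j => PySem.List.pyGetD nums j 0) (fun j => j) true = rest.map (fun i : Nat => (i : Int)) ∧
      PySem.List.sorted2 (PySem.List.enumerate nums) (fun p => p.2) (fun p => p.1) true
        = rest.map (fun i : Nat => ((i : Int), PySem.List.pyGetD nums (i : Int) 0)) ∧
      (∀ a ∈ rest, a < nums.length) ∧ rest.Pairwise (pvKeyGt nums) ∧
      (∀ j, j < nums.length → j ∈ rest) := by
  set C : Int := (nums.length : Int) with hC
  set enc : Int → Int := fun j => PySem.List.pyGetD nums j 0 * C + j with henc
  have hmemRange : ∀ j ∈ PySem.List.pyRange 0 C 1, 0 ≤ j ∧ j < C := by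
    intro j hj
    exact (PySem.List.mem_pyRange_one).1 hj
  -- B's sort is the single-key sort by enc
  have hB1 : PySem.List.sorted2 (PySem.List.pyRange 0 C 1)
      (fun j => PySem.List.pyGetD nums j 0) (fun j => j) true
      = PySem.List.sorted (PySem.List.pyRange 0 C 1) enc true := by
    apply pvSorted2_eq_sorted
    intro a b ha hb
    obtain ⟨ha1, ha2⟩ := hmemRange a ha
    obtain ⟨hb1, hb2⟩ := hmemRange b hb
    exact pvLex_iff C _ _ a b ha1 ha2 hb1 hb2
  set lstB := PySem.List.sorted (PySem.List.pyRange 0 C 1) enc true with hlstB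
  have hperm : lstB.Perm (PySem.List.pyRange 0 C 1) := PySem.List.sorted_perm _ _ _
  have hmemB : ∀ j ∈ lstB, 0 ≤ j ∧ j < C := fun j hj => hmemRange j (hperm.mem_iff.1 hj)
  have hnodup : lstB.Nodup := hperm.nodup_iff.2 (PySem.List.nodup_pyRange_one 0 C)
  have hpairLe : lstB.Pairwise (fun a b => enc b ≤ enc a) :=
    PySem.List.sorted_pairwise_rev _ _
  have hpairLt : lstB.Pairwise (fun a b => enc b < enc a) := by
    have hand := hnodup.and hpairLe
    apply hand.imp_of_mem
    intro a b hma hmb hab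
    obtain ⟨hne, hle⟩ := hab
    rcases lt_or_eq_of_le hle with h | h
    · exact h
    · exfalso
      obtain ⟨ha1, ha2⟩ := hmemB a hma
      obtain ⟨hb1, hb2⟩ := hmemB b hmb
      exact hne (pvEnc_inj C _ _ b a hb1 hb2 ha1 ha2 h).symm
  refine ⟨lstB.map Int.toNat, ?_, ?_, ?_, ?_, ?_⟩
  case refine_1 =>
    rw [hB1]
    symm
    have h0 : (lstB.map Int.toNat).map (fun i : Nat => (i : Int))
        = lstB.map (fun j => ((j.toNat : Nat) : Int)) := by
      rw [List.map_map]; rfl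
    rw [h0]
    have h1 : ∀ j ∈ lstB, ((j.toNat : Nat) : Int) = id j := by
      intro j hj
      simp [Int.toNat_of_nonneg (hmemB j hj).1]
    rw [List.map_congr_left h1, List.map_id]
  case refine_2 =>
    have hA1 : PySem.List.sorted2 (PySem.List.enumerate nums) (fun p => p.2) (fun p => p.1) true
        = PySem.List.sorted (PySem.List.enumerate nums) (fun p => p.2 * C + p.1) true := by
      apply pvSorted2_eq_sorted
      intro a b ha hb
      obtain ⟨ka, hka, hae⟩ := (PySem.List.mem_enumerate_iff _ _ _).1 ha
      obtain ⟨kb, hkb, hbe⟩ := (PySem.List.mem_enumerate_iff _ _ _).1 hb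
      apply pvLex_iff C _ _ a.1 b.1 <;> subst hae <;> subst hbe <;> simp <;> omega
    rw [hA1]
    have hys : (lstB.map Int.toNat).map (fun i : Nat => ((i : Int), PySem.List.pyGetD nums (i : Int) 0))
        = lstB.map (fun j => (j, PySem.List.pyGetD nums j 0)) := by
      rw [List.map_map]
      apply List.map_congr_left
      intro j hj
      obtain ⟨m, rfl⟩ : ∃ m : Nat, j = (m : Int) :=
        ⟨j.toNat, (Int.toNat_of_nonneg (hmemB j hj).1).symm⟩
      simp [PySem.List.pyGetD_natCast, List.getD]
    rw [hys]
    apply PySem.List.sorted_rev_eq_of_perm_of_pairwise_gt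
    · have he : PySem.List.enumerate nums
          = (PySem.List.pyRange 0 C 1).map (fun j => (j, PySem.List.pyGetD nums j 0)) := by
        have := PySem.List.enumerate_eq_map_pyRange nums 0
        simpa using this
      rw [he]
      exact hperm.map _
    · apply List.Pairwise.map
      · intro a b hab
        exact hab
      · exact hpairLt
  case refine_3 =>
    intro a ha
    obtain ⟨j, hj, hje⟩ := List.mem_map.1 ha
    obtain ⟨h1, h2⟩ := hmemB j hj
    omega
  case refine_4 =>
    have hpairKey : lstB.Pairwise (fun a b => pvKeyGt nums a.toNat b.toNat) := by
      apply hpairLt.imp_of_mem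
      intro a b hma hmb hab
      obtain ⟨ha1, ha2⟩ := hmemB a hma
      obtain ⟨hb1, hb2⟩ := hmemB b hmb
      obtain ⟨ma, rfl⟩ : ∃ m : Nat, a = (m : Int) := ⟨a.toNat, (Int.toNat_of_nonneg ha1).symm⟩
      obtain ⟨mb, rfl⟩ : ∃ m : Nat, b = (m : Int) := ⟨b.toNat, (Int.toNat_of_nonneg hb1).symm⟩
      have hlex := (pvLex_iff C (PySem.List.pyGetD nums (mb : Int) 0)
        (PySem.List.pyGetD nums (ma : Int) 0) (mb : Int) (ma : Int) hb1 hb2 ha1 ha2).2 hab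
      unfold pvKeyGt
      simp only [PySem.List.pyGetD_natCast, Int.toNat_natCast] at hlex ⊢
      rcases hlex with h | ⟨h1, h2⟩
      · exact Or.inl h
      · rcases lt_or_ge (nums.getD mb 0) (nums.getD ma 0) with h3 | h3
        · exact Or.inl h3
        · exact Or.inr ⟨le_antisymm h3 (not_lt.1 h1), by omega⟩
    exact List.Pairwise.map _ (fun a b h => h) hpairKey
  case refine_5 =>
    intro j hj
    apply List.mem_map.2
    refine ⟨(j : Int), ?_, by simp⟩
    apply hperm.mem_iff.2
    apply (PySem.List.mem_pyRange_one).2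
    constructor <;> omega

-- ===== VERDICT (by name: the statement is the Claim_ definition above) =====
theorem validSubarraySize_spec : Claim_equal_validSubarraySize := by
  intro nums threshold _
  unfold Spec_validSubarraySize validSubarraySize validSubarraySize_alt
  obtain ⟨rest, hB, hA, hlt, hsort, hmem⟩ := pvSortlists nums
  rw [hA, hB]
  refine pvLoop_agree nums threshold rest _ _ _ _ [] ?_
  have hget : ∀ x : Nat, x < nums.length →
      (PySem.List.pyRange 0 (nums.length : Int) 1).getD x 0 = (x : Int) := by
    intro x hx
    have hlen : (PySem.List.pyRange 0 (nums.length : Int) 1).length = nums.length := by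
      rw [PySem.List.length_pyRange_one]; omega
    have : x < (PySem.List.pyRange 0 (nums.length : Int) 1).length := by omega
    rw [List.getD_eq_getElem _ _ this, PySem.List.getElem_pyRange_one]
    omega
  constructor
  · exact hlt
  · exact hsort
  · intro j hj hjn; exact absurd (hmem j hj) hjn
  · intro p hp; cases hp
  · intro p hp; cases hp
  · intro j hj hjn; exact absurd (hmem j hj) hjn
  · constructor
    case bounds => intro p hp; cases hp
    case disj => exact List.Pairwise.nil
    case root => intro p hp; cases hp
    case wf =>
      refine ⟨by rw [PySem.List.length_pyRange_one]; omega, ?_, ?_⟩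
      · intro x hx
        have h1 := hget x hx
        constructor
        · rw [h1]; positivity
        · unfold pvPf; rw [h1]; simpa using hx
      · intro x hx
        refine ⟨x, pvReaches_of_root ?_⟩
        unfold pvPf; rw [hget x hx]; simp
    case size_len =>
      rw [PySem.List.pyRepeat_singleton, List.length_replicate]
      omega
    case fresh =>
      intro x hx _
      constructor
      · refine pvReaches_of_root ?_
        unfold pvPf; rw [hget x hx]; simp
      · rw [PySem.List.pyRepeat_singleton]
        exact List.getD_replicate _ (by omega)
  · intro p hp; cases hp
  · intro x hx _
    constructor <;> rfl
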